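-- pv_equiv track=rewrite | github.com/Amanuel94/CF-Solutions | B_Inversions_2.py | kthone
-- ===== SOURCE A (Python) =====
-- def kthone(tree, k, v):
--     # m = len(tree)//2 + 1
--     # if v > m-2:
--     #     return v - m + 1
--
--     # if tree[2*v + 1] > k:
--     #     return kthone(tree, k, 2*v + 1)
--
--     # else:
--     #     return kthone(tree, k - tree[2*v + 1], 2*v + 2)
--     v = 0
--     while v <= len(tree)//2 - 1:
--         if tree[2*v + 1] > k:
--             v = 2*v + 1
--         else:
--             v = 2*v + 2
--             k = k - tree[v-1]
--     return v - (len(tree)//2)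
-- ===== SOURCE B (Python) =====
-- def kthone(tree, k, v):
--     # Recursive descent from the root; the incoming v is ignored (A resets v = 0).
--     half = len(tree) // 2
--
--     def go(v, k):
--         if v > half - 1:
--             return v - half
--         if tree[2 * v + 1] > k:
--             return go(2 * v + 1, k)
--         return go(2 * v + 2, k - tree[2 * v + 1])
--
--     return go(0, k)
-- ===== Notes on version B (the rewrite author's own statement) =====
-- stated objective: alternative
-- what changed: Replaces A's while-loop that mutates v and k with a recursive descent helper rooted at node 0 (the recurrence from A's commented-out code), with the base case tested first and the k-subtraction done at the call site.
import Mathlib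
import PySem

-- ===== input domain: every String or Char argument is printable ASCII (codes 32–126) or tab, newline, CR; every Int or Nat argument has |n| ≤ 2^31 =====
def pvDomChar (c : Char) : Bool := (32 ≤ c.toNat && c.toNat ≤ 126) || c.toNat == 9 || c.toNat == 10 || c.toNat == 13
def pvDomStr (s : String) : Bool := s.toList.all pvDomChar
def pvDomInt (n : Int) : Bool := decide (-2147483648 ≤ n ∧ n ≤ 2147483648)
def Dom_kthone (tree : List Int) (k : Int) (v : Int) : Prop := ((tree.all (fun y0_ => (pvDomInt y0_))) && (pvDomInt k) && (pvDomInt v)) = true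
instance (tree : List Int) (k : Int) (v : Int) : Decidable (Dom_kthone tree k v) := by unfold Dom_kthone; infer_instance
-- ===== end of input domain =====

-- B replaces A's while-loop (mutating v and k) with a recursive descent helper rooted at node 0; alternative decomposition, same cost.


-- ===== PORT A =====
-- A's while loop; the loop variable v starts at 0 and strictly increases, so it is kept as a Nat.
-- Python's `v <= len(tree)//2 - 1` for v ≥ 0 is `v + 1 ≤ len//2`; the indices 2v+1 and (2v+2)-1
-- are then always in range, so `.getD 0` is never the IndexError path (Python never raises here).
def kthoneLoop (tree : List Int) (k : Int) (v : Nat) : Int :=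
  if v + 1 ≤ tree.length / 2 then
    if ((PySem.List.pyGet? tree ((2 * v + 1 : Nat) : Int)).getD 0) > k then
      kthoneLoop tree k (2 * v + 1)
    else
      -- v = 2*v+2; k = k - tree[v-1]
      kthoneLoop tree (k - ((PySem.List.pyGet? tree (((2 * v + 2 - 1 : Nat)) : Int)).getD 0)) (2 * v + 2)
  else
    (v : Int) - ((tree.length / 2 : Nat) : Int)
termination_by tree.length / 2 - v
decreasing_by all_goals omega

def kthone (tree : List Int) (k : Int) (v : Int) : Int :=
  kthoneLoop tree k 0

-- ===== PORT B =====
-- recursive descent (Source B's `go`), base case first, subtraction at the call site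
def kthoneGo (tree : List Int) (half : Nat) (v : Nat) (k : Int) (hh : half = tree.length / 2) : Int :=
  if half ≤ v then
    (v : Int) - (half : Int)
  else if ((PySem.List.pyGet? tree ((2 * v + 1 : Nat) : Int)).getD 0) > k then
    kthoneGo tree half (2 * v + 1) k hh
  else
    kthoneGo tree half (2 * v + 2) (k - ((PySem.List.pyGet? tree ((2 * v + 1 : Nat) : Int)).getD 0)) hh
termination_by half - v
decreasing_by all_goals omega

def kthone_alt (tree : List Int) (k : Int) (v : Int) : Int :=
  kthoneGo tree (tree.length / 2) 0 k rfl

-- ===== PRECONDITION & SPEC =====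
def Spec_kthone (tree : List Int) (k : Int) (v : Int) (out : Int) : Prop := out = kthone_alt tree k v
instance (tree : List Int) (k : Int) (v : Int) (out : Int) : Decidable (Spec_kthone tree k v out) := by unfold Spec_kthone; infer_instance

-- ===== CLAIM (what is proved, stated in full; the proofs are below) =====
def Claim_equal_kthone : Prop := ∀ (tree : List Int) (k : Int) (v : Int), Dom_kthone tree k v → Spec_kthone tree k v (kthone tree k v)

-- ===== LEMMAS AND PROOFS =====
theorem loop_eq_go (tree : List Int) (k : Int) (v : Nat) :
    kthoneLoop tree k v = kthoneGo tree (tree.length / 2) v k rfl := by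
  fun_induction kthoneLoop tree k v with
  | case1 k v h hlt ih =>
      rw [kthoneGo]
      rw [if_neg (show ¬ (tree.length / 2 ≤ v) by omega), if_pos hlt]
      exact ih
  | case2 k v h hge ih =>
      rw [kthoneGo]
      have : ¬ (tree.length / 2 ≤ v) := by omega
      rw [if_neg this, if_neg (by simpa [show 2*v+2-1 = 2*v+1 by omega] using hge)]
      simpa [show 2*v+2-1 = 2*v+1 by omega] using ih
  | case3 k v h =>
      rw [kthoneGo, if_pos (by omega)]

-- ===== VERDICT (by name: the statement is the Claim_ definition above) =====
theorem kthone_spec : Claim_equal_kthone := by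
  intro tree k v _
  unfold Spec_kthone kthone kthone_alt
  exact loop_eq_go tree k 0
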